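-- pv_equiv track=rewrite | github.com/ellabeck03/xrf-database | pdf_to_db.py | find_section_indices
-- ===== SOURCE A (Python) =====
-- def find_section_indices(lines):
--     """
--     finds indices of header and element sections in the results
--     returns (label_idx, element_idx) or (None, None) if not found
--     """
--     label_idx = next((i for i, ln in enumerate(lines)
--                       if ln.startswith("Name") and "Duration" in ln), None)
--     element_idx = None
--     if label_idx is not None:
--         element_idx = next((j for j in range(label_idx + 1, len(lines))
--                             if lines[j].startswith("Element")), None)
--
--     return label_idx, element_idx
-- ===== SOURCE B (Python) =====
-- def find_section_indices(lines):
--     """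
--     finds indices of header and element sections in the results
--     returns (label_idx, element_idx) or (None, None) if not found
--     """
--     ans = (None, None)
--     first_elem = None  # first "Element" line index in the suffix already scanned
--     for i in range(len(lines) - 1, -1, -1):
--         ln = lines[i]
--         if ln.startswith("Name") and "Duration" in ln:
--             ans = (i, first_elem)
--         if ln.startswith("Element"):
--             first_elem = i
--     return ans
-- ===== Notes on version B (the rewrite author's own statement) =====
-- stated objective: alternative
-- what changed: Replaces A's two forward scans (an enumerate generator for the label line, then a range(label+1,len) index scan for the element line) with a single backward (right-to-left) pass that maintains the first 'Element' index of the already-scanned suffix, so each label line can be paired with its element index immediately.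
import Mathlib
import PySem

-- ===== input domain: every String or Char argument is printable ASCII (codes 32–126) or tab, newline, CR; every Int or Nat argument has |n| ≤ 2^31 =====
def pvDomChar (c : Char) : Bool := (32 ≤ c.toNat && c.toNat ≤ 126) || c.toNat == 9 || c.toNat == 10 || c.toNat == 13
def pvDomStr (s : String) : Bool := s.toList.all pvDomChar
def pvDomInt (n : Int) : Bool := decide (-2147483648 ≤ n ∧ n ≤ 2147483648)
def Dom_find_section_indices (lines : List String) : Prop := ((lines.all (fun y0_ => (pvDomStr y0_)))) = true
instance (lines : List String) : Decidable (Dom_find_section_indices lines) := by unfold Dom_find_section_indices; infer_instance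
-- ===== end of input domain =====

-- B replaces A's two forward scans with one backward pass carrying the suffix's first "Element" index; return value only, no side effects.

-- ===== PORT A =====
-- next((i for i, ln in enumerate(lines) if ln.startswith("Name") and "Duration" in ln), None)
def pvNextLabel : List (Int × String) → Option Int
  | [] => none
  | (i, ln) :: rest =>
      if PySem.Str.startswith ln "Name" && PySem.Str.isIn "Duration" ln then some i
      else pvNextLabel rest

-- next((j for j in range(label_idx+1, len(lines)) if lines[j].startswith("Element")), None)
def pvNextElem (lines : List String) : List Int → Option Int
  | [] => none
  | j :: rest =>
      match PySem.List.pyGet? lines j with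
      | some ln => if PySem.Str.startswith ln "Element" then some j else pvNextElem lines rest
      | none => pvNextElem lines rest   -- unreachable: range indices are in range

def find_section_indices (lines : List String) : Option Int × Option Int :=
  match pvNextLabel (PySem.List.enumerate lines 0) with
  | none => (none, none)
  | some l => (some l, pvNextElem lines (PySem.List.pyRange (l + 1) (lines.length : Int) 1))

-- ===== PORT B =====
-- backward loop 'for i in range(len-1, -1, -1)': structural recursion that handles the
-- tail (later indices) first, then the current line, carrying (ans, first_elem)
def pvBack : List String → Int → (Option Int × Option Int) × Option Int
  | [], _ => ((none, none), none)
  | ln :: rest, i =>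
      let r := pvBack rest (i + 1)
      let ans := if PySem.Str.startswith ln "Name" && PySem.Str.isIn "Duration" ln then (some i, r.2) else r.1
      let fe := if PySem.Str.startswith ln "Element" then some i else r.2
      (ans, fe)

def find_section_indices_alt (lines : List String) : Option Int × Option Int :=
  (pvBack lines 0).1

-- ===== PRECONDITION & SPEC =====
def Spec_find_section_indices (lines : List String) (out : Option Int × Option Int) : Prop := out = find_section_indices_alt lines
instance (lines : List String) (out : Option Int × Option Int) : Decidable (Spec_find_section_indices lines out) := by unfold Spec_find_section_indices; infer_instance

-- ===== CLAIM (what is proved, stated in full; the proofs are below) =====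
def Claim_equal_find_section_indices : Prop := ∀ (lines : List String), Dom_find_section_indices lines → Spec_find_section_indices lines (find_section_indices lines)

-- ===== LEMMAS AND PROOFS =====

-- the backward pass computes, for the suffix starting at index |pre|:
--  .1 = A's answer restricted to that suffix, .2 = the first "Element" index in it
lemma pvBack_eq (suf : List String) : ∀ (pre : List String),
    pvBack suf (pre.length : Int)
      = ((match pvNextLabel (PySem.List.enumerate suf (pre.length : Int)) with
          | none => (none, none)
          | some l => (some l, pvNextElem (pre ++ suf) (PySem.List.pyRange (l + 1) ((pre ++ suf).length : Int) 1))),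
         pvNextElem (pre ++ suf) (PySem.List.pyRange (pre.length : Int) ((pre ++ suf).length : Int) 1)) := by
  induction suf with
  | nil =>
    intro pre
    simp [pvBack, pvNextLabel, pvNextElem, PySem.List.enumerate, PySem.List.pyRange_one_eq_nil]
  | cons ln rest ih =>
    intro pre
    have hIH := ih (pre ++ [ln])
    simp only [List.append_assoc, List.cons_append, List.nil_append, List.length_append,
      List.length_cons, List.length_nil] at hIH
    push_cast at hIH
    have hlt : (pre.length : Int) < ((pre ++ ln :: rest).length : Int) := by
      simp only [List.length_append, List.length_cons]; push_cast; omega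
    have hget : PySem.List.pyGet? (pre ++ ln :: rest) (pre.length : Int) = some ln := by
      rw [PySem.List.pyGet?_natCast]
      simp
    rw [PySem.List.pyRange_one_cons hlt]
    simp only [pvBack, pvNextElem, hget, PySem.List.enumerate_cons, pvNextLabel]
    ring_nf at hIH ⊢
    rw [hIH]
    rcases h2 : pvNextLabel (PySem.List.enumerate rest (1 + (pre.length : Int))) with _ | l <;>
      simp only [h2] <;> split_ifs <;> simp_all <;> ring_nf <;> simp

-- ===== VERDICT (by name: the statement is the Claim_ definition above) =====
theorem find_section_indices_spec : Claim_equal_find_section_indices := by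
  intro lines _
  unfold Spec_find_section_indices find_section_indices find_section_indices_alt
  have h := pvBack_eq lines []
  simp only [List.nil_append, List.length_nil] at h
  push_cast at h
  simp [h]
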